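-- pv_equiv track=rewrite | github.com/JSarasua/AdventOfCode2021 | Source/Day12.py | GetFilteredPreviousStepsDay2
-- ===== SOURCE A (Python) =====
-- def GetFilteredPreviousStepsDay2(currentPath):
--     stepsVisitedOnce = []
--     stepVisitedTwice = []
--     filteredSteps = []
--     for step in currentPath:
--         if step == 'start' or step == 'end':
--             filteredSteps.append(step)
--         elif step.islower():
--             if len(stepVisitedTwice) > 0:
--                 filteredSteps.append(step)
--             elif step in stepsVisitedOnce:
--                 stepVisitedTwice.append(step)
--                 filteredSteps.append(step)
--             else:
--                 stepsVisitedOnce.append(step)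
--     if len(stepVisitedTwice) > 0:
--         for oneStep in stepsVisitedOnce:
--             filteredSteps.append(oneStep)
--     return filteredSteps
-- ===== SOURCE B (Python) =====
-- def GetFilteredPreviousStepsDay2(currentPath):
--     # One forward scan finds the split point: the first lowercase cave that
--     # already occurred (the "visited twice" trigger).  Everything else is
--     # three plain filters over the two halves.
--     seen = set()
--     pre = []
--     suf = None
--     for step in currentPath:
--         if step not in ('start', 'end') and step.islower():
--             if step in seen:
--                 suf = currentPath[len(pre):]
--                 break
--             seen.add(step)
--         pre.append(step)
--     if suf is None:
--         return [s for s in currentPath if s in ('start', 'end')]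
--     return ([s for s in pre if s in ('start', 'end')]
--             + [s for s in suf if s in ('start', 'end') or s.islower()]
--             + [s for s in pre if s not in ('start', 'end') and s.islower()])
-- ===== Notes on version B (the rewrite author's own statement) =====
-- stated objective: simpler
-- what changed: A's single pass over a three-list state machine (visited-once list, visited-twice flag list, output accumulator, plus a final flush) is replaced by one scan that only locates the first repeated lowercase cave, splitting the path in two, after which the result is assembled from three plain filters over the two halves.
import Mathlib
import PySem

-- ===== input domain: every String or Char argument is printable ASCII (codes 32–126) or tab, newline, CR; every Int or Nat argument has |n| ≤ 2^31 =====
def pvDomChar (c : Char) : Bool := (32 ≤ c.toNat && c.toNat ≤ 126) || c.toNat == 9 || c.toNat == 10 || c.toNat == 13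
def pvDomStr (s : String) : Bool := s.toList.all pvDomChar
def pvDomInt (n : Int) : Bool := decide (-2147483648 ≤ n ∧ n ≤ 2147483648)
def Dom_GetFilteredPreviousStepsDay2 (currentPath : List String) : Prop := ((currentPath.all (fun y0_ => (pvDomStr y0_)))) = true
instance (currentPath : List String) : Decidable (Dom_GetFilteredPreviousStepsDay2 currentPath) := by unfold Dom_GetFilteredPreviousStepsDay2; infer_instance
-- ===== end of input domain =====

-- B replaces A's three-list state machine by one scan that finds the first repeated lowercase cave
-- (the split point) and three plain filters over the two halves; objective: simpler, same cost.

-- shared test helpers (both Pythons literally contain these tests)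
-- Python str.islower(): has a cased char and no uppercase one — exact on the ASCII domain
def pvIslower (s : String) : Bool :=
  s.toList.any PySem.Chars.islower && s.toList.all (fun c => !(PySem.Chars.isupper c))
def pvIsSE (s : String) : Bool := s == "start" || s == "end"
def pvIsLo (s : String) : Bool := !(pvIsSE s) && pvIslower s

-- ===== PORT A =====
def loopA : List String → List String → List String → List String → List String
  | [], once, twice, filtered =>
      if twice.length > 0 then filtered ++ once else filtered
  | step :: rest, once, twice, filtered =>
      if pvIsSE step then loopA rest once twice (filtered ++ [step])
      else if pvIslower step then
        if twice.length > 0 then loopA rest once twice (filtered ++ [step])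
        else if once.contains step then loopA rest once (twice ++ [step]) (filtered ++ [step])
        else loopA rest (once ++ [step]) twice filtered
      else loopA rest once twice filtered

def GetFilteredPreviousStepsDay2 (currentPath : List String) : List String :=
  loopA currentPath [] [] []

-- ===== PORT B =====
-- the scan: returns (pre, suffix-from-trigger) at the first repeated lowercase cave, none otherwise
def splitB : List String → PySem.Set String → List String → Option (List String × List String)
  | [], _, _ => none
  | step :: rest, seen, pre =>
      if pvIsLo step then
        if PySem.Set.contains seen step then some (pre, step :: rest)
        else splitB rest (PySem.Set.add seen step) (pre ++ [step])
      else splitB rest seen (pre ++ [step])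

def GetFilteredPreviousStepsDay2_alt (currentPath : List String) : List String :=
  match splitB currentPath PySem.Set.empty [] with
  | none => currentPath.filter (fun s => pvIsSE s)
  | some (pre, suf) =>
      pre.filter (fun s => pvIsSE s)
        ++ suf.filter (fun s => pvIsSE s || pvIslower s)
        ++ pre.filter (fun s => pvIsLo s)

-- ===== PRECONDITION & SPEC =====
def Spec_GetFilteredPreviousStepsDay2 (currentPath : List String) (out : List String) : Prop := out = GetFilteredPreviousStepsDay2_alt currentPath
instance (currentPath : List String) (out : List String) : Decidable (Spec_GetFilteredPreviousStepsDay2 currentPath out) := by unfold Spec_GetFilteredPreviousStepsDay2; infer_instance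

-- ===== CLAIM (what is proved, stated in full; the proofs are below) =====
def Claim_equal_GetFilteredPreviousStepsDay2 : Prop := ∀ (currentPath : List String), Dom_GetFilteredPreviousStepsDay2 currentPath → Spec_GetFilteredPreviousStepsDay2 currentPath (GetFilteredPreviousStepsDay2 currentPath)

-- ===== LEMMAS AND PROOFS =====

-- once the "visited twice" list is nonempty, A just keeps every start/end or lowercase step
lemma loopA_twice (l : List String) (once twice filtered : List String) (h : twice ≠ []) :
    loopA l once twice filtered =
      filtered ++ l.filter (fun s => pvIsSE s || pvIslower s) ++ once := by
  induction l generalizing filtered with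
  | nil =>
      simp [loopA, List.length_pos_iff.mpr h]
  | cons step rest ih =>
      have hlen : twice.length > 0 := List.length_pos_iff.mpr h
      by_cases h1 : pvIsSE step
      · simp [loopA, h1, ih]
      · by_cases h2 : pvIslower step
        · simp [loopA, h1, h2, hlen, ih]
        · simp [loopA, h1, h2, ih]

-- the accumulated prefix only shifts splitB's first component
lemma splitB_pre (l : List String) (seen : PySem.Set String) (pre : List String) :
    splitB l seen pre =
      match splitB l seen [] with
      | none => none
      | some (p, suf) => some (pre ++ p, suf) := by
  induction l generalizing seen pre with
  | nil => simp [splitB]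
  | cons step rest ih =>
      by_cases h1 : pvIsLo step
      · by_cases h2 : PySem.Set.contains seen step = true
        · simp [splitB, h1, List.mem_of_elem_eq_true h2]
        · simp only [splitB, if_pos h1, if_neg h2, List.nil_append]
          rw [ih _ (pre ++ [step]), ih _ [step]]
          cases splitB rest (PySem.Set.add seen step) [] with
          | none => rfl
          | some ps => cases ps with | mk p suf => simp
      · simp only [splitB, if_neg h1, List.nil_append]
        rw [ih _ (pre ++ [step]), ih _ [step]]
        cases splitB rest seen [] with
        | none => rfl
        | some ps => cases ps with | mk p suf => simp

-- main invariant: before any repeat, A's loop is determined by B's split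
lemma loopA_split (l : List String) (once filtered : List String) (seen : PySem.Set String)
    (hseen : ∀ s : String, s ∈ seen ↔ s ∈ once) :
    loopA l once [] filtered =
      match splitB l seen [] with
      | none => filtered ++ l.filter (fun s => pvIsSE s)
      | some (p, suf) =>
          filtered ++ p.filter (fun s => pvIsSE s)
            ++ suf.filter (fun s => pvIsSE s || pvIslower s)
            ++ once ++ p.filter (fun s => pvIsLo s) := by
  induction l generalizing once filtered seen with
  | nil => simp [loopA, splitB]
  | cons step rest ih =>
      by_cases h1 : pvIsSE step
      · have hlo : pvIsLo step = false := by simp [pvIsLo, h1]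
        rw [loopA, if_pos h1]
        simp only [splitB, hlo, Bool.false_eq_true, if_false, List.nil_append]
        rw [splitB_pre, ih (once := once) (filtered := filtered ++ [step]) (seen := seen) hseen]
        cases splitB rest seen [] with
        | none => simp [h1]
        | some ps => cases ps with | mk p suf => simp [h1, hlo]
      · by_cases h2 : pvIslower step
        · have hlo : pvIsLo step = true := by simp [pvIsLo, h1, h2]
          by_cases h3 : step ∈ once
          · -- the trigger: step repeats
            have h3' : once.contains step = true := by simpa using h3
            rw [loopA, if_neg h1, if_pos h2, if_neg (by simp), if_pos h3',
              loopA_twice _ _ _ _ (by simp)]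
            have hc2 : PySem.Set.contains seen step = true :=
              List.elem_eq_true_of_mem ((hseen step).mpr h3)
            simp only [splitB, hlo, if_true, if_pos hc2]
            simp [h1, h2]
          · have hc : step ∉ seen := fun h => h3 ((hseen step).mp h)
            have hseen' : ∀ s : String,
                s ∈ PySem.Set.add seen step ↔ s ∈ once ++ [step] := by
              intro s
              simp [PySem.Set.mem_add, hseen s]
            rw [loopA, if_neg h1, if_pos h2, if_neg (by simp),
              if_neg (by simpa using h3)]
            simp only [splitB, hlo, if_true, List.nil_append]
            rw [splitB_pre, ih (once := once ++ [step]) (filtered := filtered) (seen := PySem.Set.add seen step) hseen']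
            cases splitB rest (PySem.Set.add seen step) [] with
            | none => simp [h1, hc]
            | some ps => cases ps with | mk p suf => simp [h1, hlo, hc]
        · have hlo : pvIsLo step = false := by simp [pvIsLo, h2]
          rw [loopA, if_neg h1, if_neg h2]
          simp only [splitB, hlo, Bool.false_eq_true, if_false, List.nil_append]
          rw [splitB_pre, ih (once := once) (filtered := filtered) (seen := seen) hseen]
          cases splitB rest seen [] with
          | none => simp [h1]
          | some ps => cases ps with | mk p suf => simp [h1, hlo]

-- ===== VERDICT (by name: the statement is the Claim_ definition above) =====
theorem GetFilteredPreviousStepsDay2_spec : Claim_equal_GetFilteredPreviousStepsDay2 := by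
  intro cp _
  unfold Spec_GetFilteredPreviousStepsDay2 GetFilteredPreviousStepsDay2 GetFilteredPreviousStepsDay2_alt
  rw [loopA_split cp [] [] PySem.Set.empty (by intro s; simp [PySem.Set.empty])]
  cases splitB cp PySem.Set.empty [] with
  | none => simp
  | some ps => cases ps with | mk p suf => simp
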